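-- pv_equiv track=rewrite | github.com/PeppeDrone/DiegoRoboticProt | Code/view_emg_interactive.py | _group_imu_channels
-- ===== SOURCE A (Python) =====
-- from typing import List, Optional, Tuple
--
-- def _group_imu_channels(channel_names: list) -> List[Tuple[str, List[str]]]:
--     """Group IMU channels by sensor; each sensor has X, Y, Z. Returns [(base_name, [ch_x, ch_y, ch_z]), ...]."""
--     groups: dict[str, list[str]] = {}
--     for ch in channel_names:
--         # Handle "Acc 1.X" and "GYRO.X 3" style names
--         if ".X" in ch or ".Y" in ch or ".Z" in ch:
--             base = ch.replace(".X", "").replace(".Y", "").replace(".Z", "").strip()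
--         else:
--             base = ch
--         groups.setdefault(base, []).append(ch)
--     for base in groups:
--         def _axis_order(c: str) -> int:
--             for i, s in enumerate([".X", ".Y", ".Z"]):
--                 if s in c:
--                     return i
--             return 99
--
--         groups[base].sort(key=_axis_order)
--     return [(b, groups[b]) for b in sorted(groups.keys(), key=lambda x: groups[x][0])]
-- ===== SOURCE B (Python) =====
-- from typing import List, Tuple
--
--
-- def _group_imu_channels(channel_names: list) -> List[Tuple[str, List[str]]]:
--     """Group IMU channels by sensor base: one stable sort of (base, ch) pairs by
--     (base, axis), a linear scan that materializes the contiguous groups, then one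
--     sort of the groups by their first channel."""
--     def base_of(ch: str) -> str:
--         if ".X" in ch or ".Y" in ch or ".Z" in ch:
--             return ch.replace(".X", "").replace(".Y", "").replace(".Z", "").strip()
--         return ch
--
--     def axis(c: str) -> int:
--         if ".X" in c:
--             return 0
--         if ".Y" in c:
--             return 1
--         if ".Z" in c:
--             return 2
--         return 99
--
--     pairs = [(base_of(ch), ch) for ch in channel_names]
--     pairs.sort(key=lambda p: (p[0], axis(p[1])))
--     groups: List[Tuple[str, List[str]]] = []
--     for b, ch in pairs:
--         if groups and groups[-1][0] == b:
--             groups[-1][1].append(ch)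
--         else:
--             groups.append((b, [ch]))
--     return sorted(groups, key=lambda g: g[1][0])
-- ===== Notes on version B (the rewrite author's own statement) =====
-- stated objective: alternative
-- what changed: Replaces A's single-pass dict accumulation with per-group in-place sorts and a final sort over the key list by one stable sort of (base, channel) pairs on the (base, axis) key, a linear scan that materializes the contiguous groups, and one direct sort of the (base, group) pairs by first channel.
import Mathlib
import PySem

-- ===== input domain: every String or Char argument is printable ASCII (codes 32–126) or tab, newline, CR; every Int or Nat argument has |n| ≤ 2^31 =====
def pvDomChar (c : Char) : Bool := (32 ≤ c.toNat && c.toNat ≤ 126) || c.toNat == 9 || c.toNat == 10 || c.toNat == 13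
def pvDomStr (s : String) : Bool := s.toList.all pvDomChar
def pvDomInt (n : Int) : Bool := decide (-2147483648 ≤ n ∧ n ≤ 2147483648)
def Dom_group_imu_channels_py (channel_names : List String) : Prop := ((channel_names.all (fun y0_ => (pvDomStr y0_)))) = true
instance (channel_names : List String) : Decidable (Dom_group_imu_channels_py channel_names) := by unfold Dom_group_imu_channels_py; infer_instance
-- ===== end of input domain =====

-- B sorts the (base, channel) pairs once by the (base, axis) key, materializes the contiguous
-- groups in a linear scan, and sorts those (base, group) pairs directly, instead of A's dict
-- accumulation with in-place per-group sorts and a final sort over the key list (objective: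
-- alternative decomposition).

-- ===== PORT A =====
-- base = ch.replace(".X","").replace(".Y","").replace(".Z","").strip() when an axis tag occurs, else ch
def pvBaseA (ch : String) : String :=
  if PySem.Str.isIn ".X" ch || PySem.Str.isIn ".Y" ch || PySem.Str.isIn ".Z" ch then
    PySem.Str.strip (PySem.Str.replace (PySem.Str.replace (PySem.Str.replace ch ".X" "") ".Y" "") ".Z" "")
  else ch

-- the 'for i, s in enumerate([".X",".Y",".Z"]): if s in c: return i / return 99' loop of _axis_order
def pvAxisLoopA : List (Int × String) → String → Int
  | [], _ => 99
  | (i, s) :: rest, c => if PySem.Str.isIn s c then i else pvAxisLoopA rest c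

def pvAxisA (c : String) : Int := pvAxisLoopA (PySem.List.enumerate [".X", ".Y", ".Z"] 0) c

def group_imu_channels_py (channel_names : List String) : List (String × List String) :=
  -- groups.setdefault(base, []).append(ch)
  let groups := channel_names.foldl
    (fun d ch => d.modify (pvBaseA ch) [] (fun l => l ++ [ch])) PySem.Dict.empty
  -- for base in groups: groups[base].sort(key=_axis_order)
  let groups2 := groups.keys.foldl
    (fun d b => d.modify b [] (fun l => PySem.List.sorted l pvAxisA)) groups
  -- [(b, groups[b]) for b in sorted(groups.keys(), key=lambda x: groups[x][0])]
  (PySem.List.sorted groups2.keys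
      (fun b => PySem.List.pyGetD (groups2.getD b []) 0 "")).map
    (fun b => (b, groups2.getD b []))

-- ===== PORT B =====
def pvBaseB (ch : String) : String :=
  if PySem.Str.isIn ".X" ch || PySem.Str.isIn ".Y" ch || PySem.Str.isIn ".Z" ch then
    PySem.Str.strip (PySem.Str.replace (PySem.Str.replace (PySem.Str.replace ch ".X" "") ".Y" "") ".Z" "")
  else ch

def pvAxisB (c : String) : Int :=
  if PySem.Str.isIn ".X" c then 0
  else if PySem.Str.isIn ".Y" c then 1
  else if PySem.Str.isIn ".Z" c then 2
  else 99

-- the body of B's grouping loop: append ch to the last group when its base matches, else open a new group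
def pvStep (groups : List (String × List String)) (p : String × String) : List (String × List String) :=
  if decide (groups ≠ []) && ((groups.getLastD ("", [])).1 == p.1) then
    groups.dropLast ++ [((groups.getLastD ("", [])).1, (groups.getLastD ("", [])).2 ++ [p.2])]
  else groups ++ [(p.1, [p.2])]

def group_imu_channels_py_alt (channel_names : List String) : List (String × List String) :=
  let pairs := channel_names.map (fun ch => (pvBaseB ch, ch))
  -- pairs.sort(key=lambda p: (p[0], axis(p[1]))) : stable sort on the tuple key
  let sortedPairs := PySem.List.sorted2 pairs (fun p => p.1) (fun p => pvAxisB p.2)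
  let groups := sortedPairs.foldl pvStep []
  PySem.List.sorted groups (fun g => PySem.List.pyGetD g.2 0 "")

-- ===== PRECONDITION & SPEC =====
def Spec_group_imu_channels_py (channel_names : List String) (out : List (String × List String)) : Prop := out = group_imu_channels_py_alt channel_names
instance (channel_names : List String) (out : List (String × List String)) : Decidable (Spec_group_imu_channels_py channel_names out) := by unfold Spec_group_imu_channels_py; infer_instance

-- ===== CLAIM (what is proved, stated in full; the proofs are below) =====
def Claim_equal_group_imu_channels_py : Prop := ∀ (channel_names : List String), Dom_group_imu_channels_py channel_names → Spec_group_imu_channels_py channel_names (group_imu_channels_py channel_names)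

-- ===== LEMMAS AND PROOFS =====

theorem pvBase_eq : pvBaseA = pvBaseB := rfl

theorem pvAxis_eq (c : String) : pvAxisA c = pvAxisB c := by
  simp only [pvAxisA, pvAxisB, PySem.List.enumerate, pvAxisLoopA]
  split_ifs <;> rfl

-- a modify-fold over a Nodup key list applies f once at each listed key
theorem getD_foldl_modify_once (ks : List String) (hnd : ks.Nodup)
    (d : PySem.Dict String (List String)) (f : List String → List String) (c : String) :
    (ks.foldl (fun d b => d.modify b [] f) d).getD c []
      = if c ∈ ks then f (d.getD c []) else d.getD c [] := by
  induction ks generalizing d with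
  | nil => simp
  | cons k rest ih =>
      have hk : k ∉ rest := (List.nodup_cons.mp hnd).1
      have hr : rest.Nodup := (List.nodup_cons.mp hnd).2
      simp only [List.foldl_cons, ih hr, PySem.Dict.getD_modify]
      by_cases hck : c = k
      · subst hck; simp [hk]
      · simp [hck, List.mem_cons]

theorem set_update_self (s : List String) : PySem.Set.update s s = s := by
  rw [PySem.Set.update_eq_append_filter]
  have h : (PySem.Set.ofList s).filter (fun y => !(PySem.Set.contains s y)) = [] := by
    apply List.filter_eq_nil_iff.mpr
    intro y hy
    rw [PySem.Set.mem_ofList] at hy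
    simp [PySem.Set.contains_eq_listContains, hy]
  rw [h, List.append_nil]

theorem insertBy_map {α β : Type} (g : α → β) (before : β → β → Bool) (x : α) (ys : List α) :
    PySem.List.insertBy before (g x) (ys.map g)
      = (PySem.List.insertBy (fun a b => before (g a) (g b)) x ys).map g := by
  induction ys with
  | nil => rfl
  | cons y ys ih =>
      simp only [List.map_cons, PySem.List.insertBy]
      by_cases h : before (g x) (g y) <;> simp [h, ih]

theorem foldl_insertBy_map {α β κ : Type} [LT κ] [DecidableLT κ] (g : α → β) (key : β → κ)
    (l : List α) : ∀ (acc : List α),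
    l.foldl (fun acc x => PySem.List.insertBy (fun a b => decide (key a < key b)) (g x) acc) (acc.map g)
      = (l.foldl (fun acc x => PySem.List.insertBy (fun a b => decide (key (g a) < key (g b))) x acc) acc).map g := by
  induction l with
  | nil => intro acc; rfl
  | cons x l ih =>
      intro acc
      simp only [List.foldl_cons, insertBy_map g (fun a b => decide (key a < key b)) x acc]
      exact ih _

theorem sorted_map_key {α β κ : Type} [LT κ] [DecidableLT κ] (g : α → β) (key : β → κ)
    (l : List α) :
    PySem.List.sorted (l.map g) key = (PySem.List.sorted l (fun a => key (g a))).map g := by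
  rw [PySem.List.sorted_eq_foldl_insertBy, PySem.List.sorted_eq_foldl_insertBy, List.foldl_map]
  simpa using foldl_insertBy_map g key l []

theorem groups_getD (l : List String) (c : String) :
    (l.foldl (fun d ch => d.modify (pvBaseA ch) [] (fun s => s ++ [ch])) PySem.Dict.empty).getD c []
      = l.filter (fun ch => pvBaseA ch == c) := by
  have h := PySem.Dict.getD_foldl_modify_append (l.map (fun ch => (pvBaseA ch, ch))) PySem.Dict.empty c
  rw [List.foldl_map] at h
  simpa [List.filter_map, Function.comp_def] using h

theorem groups_keys (l : List String) :
    (l.foldl (fun d ch => d.modify (pvBaseA ch) [] (fun s => s ++ [ch])) PySem.Dict.empty).keys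
      = PySem.List.dedup (l.map pvBaseA) := by
  have h := PySem.Dict.keys_foldl_modify_key l pvBaseA ([] : List String)
    (fun _ ch s => s ++ [ch]) PySem.Dict.empty
  simpa using h

theorem groups_keys_nodup (l : List String) :
    (l.foldl (fun d ch => d.modify (pvBaseA ch) [] (fun s => s ++ [ch])) PySem.Dict.empty).keys.Nodup := by
  rw [groups_keys]
  exact PySem.List.nodup_dedup (l.map pvBaseA)

theorem groups2_getD (l : List String) (c : String) :
    (((l.foldl (fun d ch => d.modify (pvBaseA ch) [] (fun s => s ++ [ch])) PySem.Dict.empty).keys).foldl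
        (fun d b => d.modify b [] (fun s => PySem.List.sorted s pvAxisA))
        (l.foldl (fun d ch => d.modify (pvBaseA ch) [] (fun s => s ++ [ch])) PySem.Dict.empty)).getD c []
      = PySem.List.sorted (l.filter (fun ch => pvBaseA ch == c)) pvAxisA := by
  rw [getD_foldl_modify_once _ (groups_keys_nodup l) _ _ c, groups_getD]
  by_cases hc : c ∈ (l.foldl (fun d ch => d.modify (pvBaseA ch) [] (fun s => s ++ [ch])) PySem.Dict.empty).keys
  · simp [hc]
  · have hfil : l.filter (fun ch => pvBaseA ch == c) = [] := by
      rw [groups_keys] at hc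
      apply List.filter_eq_nil_iff.mpr
      intro ch hch
      have : pvBaseA ch ≠ c := by
        intro he
        exact hc ((PySem.List.mem_dedup _ _).mpr (List.mem_map.mpr ⟨ch, hch, he⟩))
      simpa using this
    simp [hc, hfil]
    rfl

theorem groups2_keys (l : List String) :
    (((l.foldl (fun d ch => d.modify (pvBaseA ch) [] (fun s => s ++ [ch])) PySem.Dict.empty).keys).foldl
        (fun d b => d.modify b [] (fun s => PySem.List.sorted s pvAxisA))
        (l.foldl (fun d ch => d.modify (pvBaseA ch) [] (fun s => s ++ [ch])) PySem.Dict.empty)).keys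
      = PySem.List.dedup (l.map pvBaseA) := by
  rw [PySem.Dict.keys_foldl_modify, set_update_self, groups_keys]

-- ----- B-side machinery -----

-- comparator of sorted2 with key (p.1, axis p.2), and the single-key comparators
def pvLex (a b : String × String) : Bool :=
  decide (a.1 < b.1) || (!decide (b.1 < a.1) && decide (pvAxisB a.2 < pvAxisB b.2))

def pvAxC (a b : String) : Bool := decide (pvAxisB a < pvAxisB b)

def pvStrC (a b : String) : Bool := decide (a < b)

-- the per-base group of channels, in axis order
def pvF (l : List String) (b : String) : List String :=
  PySem.List.sorted (l.filter (fun ch => pvBaseB ch == b)) pvAxisB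

-- groups flattened back to (base, channel) pairs, bases in the order of bs
def pvFlat (G : String → List String) (bs : List String) : List (String × String) :=
  bs.flatMap (fun b => (G b).map (fun c => (b, c)))

theorem pvFlat_cons (G : String → List String) (b : String) (rest : List String) :
    pvFlat G (b :: rest) = (G b).map (fun c => (b, c)) ++ pvFlat G rest := rfl

theorem pvFlat_congr (G G' : String → List String) (bs : List String)
    (h : ∀ b ∈ bs, G b = G' b) : pvFlat G bs = pvFlat G' bs := by
  induction bs with
  | nil => rfl
  | cons b rest ih =>
      rw [pvFlat_cons, pvFlat_cons, h b (by simp), ih (fun b hb => h b (by simp [hb]))]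

theorem insertBy_skip {α : Type} (before : α → α → Bool) (x : α) (g rest : List α)
    (h : ∀ y ∈ g, before x y = false) :
    PySem.List.insertBy before x (g ++ rest) = g ++ PySem.List.insertBy before x rest := by
  induction g with
  | nil => rfl
  | cons y g ih =>
      simp only [List.cons_append, PySem.List.insertBy, h y (by simp)]
      simp only [Bool.false_eq_true, if_false, List.cons.injEq, true_and]
      exact ih (fun z hz => h z (by simp [hz]))

theorem insertBy_all_true {α : Type} (before : α → α → Bool) (x : α) (ys1 ys2 : List α)
    (h : ∀ y ∈ ys2, before x y = true) :
    PySem.List.insertBy before x (ys1 ++ ys2) = PySem.List.insertBy before x ys1 ++ ys2 := by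
  induction ys1 with
  | nil =>
      cases ys2 with
      | nil => rfl
      | cons y ys => simp [PySem.List.insertBy, h y (by simp)]
  | cons y ys1 ih =>
      simp only [List.cons_append, PySem.List.insertBy]
      by_cases hb : before x y = true
      · simp [hb]
      · simp only [Bool.not_eq_true] at hb
        simp [hb, ih]

theorem insertBy_cons_true {α : Type} (before : α → α → Bool) (x y : α) (t : List α)
    (h : before x y = true) :
    PySem.List.insertBy before x (y :: t) = x :: y :: t := by
  simp [PySem.List.insertBy, h]

-- inserting a pair whose base is already present lands inside that base's block
theorem insert_flat_mem (G : String → List String) (b0 ch : String) :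
    ∀ (bs : List String), bs.Pairwise (· < ·) → b0 ∈ bs →
    PySem.List.insertBy pvLex (b0, ch) (pvFlat G bs)
      = pvFlat (fun b => if b = b0 then PySem.List.insertBy pvAxC ch (G b) else G b) bs := by
  intro bs
  induction bs with
  | nil => intro _ h; exact absurd h (by simp)
  | cons b1 rest ih =>
      intro hpw hmem
      have hpw1 : ∀ b ∈ rest, b1 < b := fun b hb => (List.pairwise_cons.mp hpw).1 b hb
      have hpwr : rest.Pairwise (· < ·) := (List.pairwise_cons.mp hpw).2
      rw [pvFlat_cons, pvFlat_cons]
      by_cases he : b1 = b0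
      · subst he
        have htail : ∀ y ∈ pvFlat G rest, pvLex (b1, ch) y = true := by
          intro y hy
          simp only [pvFlat, List.mem_flatMap, List.mem_map] at hy
          obtain ⟨b, hb, c, _, rfl⟩ := hy
          simp [pvLex, hpw1 b hb]
        rw [insertBy_all_true _ _ _ _ htail]
        have hmap : PySem.List.insertBy pvLex (b1, ch) ((G b1).map (fun c => (b1, c)))
            = (PySem.List.insertBy pvAxC ch (G b1)).map (fun c => (b1, c)) := by
          rw [insertBy_map (fun c => (b1, c)) pvLex ch (G b1)]
          have hcc : (fun a b => pvLex (b1, a) (b1, b)) = pvAxC := by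
            funext a b; simp [pvLex, pvAxC]
          rw [hcc]
        rw [hmap, if_pos rfl]
        congr 1
        apply pvFlat_congr
        intro b hb
        have hne : ¬ b = b1 := fun h => absurd (h ▸ hpw1 b hb) (lt_irrefl b1)
        simp [hne]
      · have hb0 : b0 ∈ rest := by
          rcases List.mem_cons.mp hmem with h | h
          · exact absurd h.symm he
          · exact h
        have hlt : b1 < b0 := hpw1 b0 hb0
        have hskip : ∀ y ∈ (G b1).map (fun c => (b1, c)), pvLex (b0, ch) y = false := by
          intro y hy
          obtain ⟨c, _, rfl⟩ := List.mem_map.mp hy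
          show (decide (b0 < b1) || (!decide (b1 < b0) && decide (pvAxisB ch < pvAxisB c))) = false
          rw [decide_eq_false (not_lt_of_gt hlt), decide_eq_true hlt]
          rfl
        rw [insertBy_skip _ _ _ _ hskip, ih hpwr hb0, if_neg he]

-- inserting a pair with a fresh base opens a new singleton block at its sorted position
theorem insert_flat_new (G : String → List String) (b0 ch : String) :
    ∀ (bs : List String), bs.Pairwise (· < ·) → (∀ b ∈ bs, G b ≠ []) → b0 ∉ bs →
    PySem.List.insertBy pvLex (b0, ch) (pvFlat G bs)
      = pvFlat (fun b => if b = b0 then [ch] else G b) (PySem.List.insertBy pvStrC b0 bs) := by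
  intro bs
  induction bs with
  | nil => intro _ _ _; simp [pvFlat, PySem.List.insertBy]
  | cons b1 rest ih =>
      intro hpw hne hnm
      have hpw1 : ∀ b ∈ rest, b1 < b := fun b hb => (List.pairwise_cons.mp hpw).1 b hb
      have hpwr : rest.Pairwise (· < ·) := (List.pairwise_cons.mp hpw).2
      have hne1 : b0 ≠ b1 := fun h => hnm (by simp [h])
      rcases lt_or_gt_of_ne hne1 with hlt | hgt
      · -- b0 < b1 : the new pair goes in front
        obtain ⟨y, ys, hy⟩ := List.exists_cons_of_ne_nil (hne b1 (by simp))
        have hins : PySem.List.insertBy pvStrC b0 (b1 :: rest) = b0 :: b1 :: rest := by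
          simp [PySem.List.insertBy, pvStrC, hlt]
        have hflat : pvFlat G (b1 :: rest) = (b1, y) :: (ys.map (fun c => (b1, c)) ++ pvFlat G rest) := by
          rw [pvFlat_cons, hy, List.map_cons, List.cons_append]
        have hcng : ∀ b ∈ b1 :: rest, (fun b => if b = b0 then [ch] else G b) b = G b := by
          intro b hb
          have hbne : ¬ b = b0 := by
            rcases List.mem_cons.mp hb with h | h
            · exact fun hh => hne1 (hh.symm.trans h)
            · exact fun hh => absurd (hh ▸ hpw1 b h) (not_lt_of_gt hlt)
          simp [hbne]
        have hGrest : pvFlat (fun b => if b = b0 then [ch] else G b) (b1 :: rest)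
            = pvFlat G (b1 :: rest) := pvFlat_congr _ _ _ hcng
        rw [hflat, insertBy_cons_true _ _ _ _ (by simp [pvLex, hlt] : pvLex (b0, ch) (b1, y) = true),
          hins, pvFlat_cons, hGrest, hflat, if_pos rfl]
        simp
      · -- b1 < b0 : walk past the b1 block
        have hskip : ∀ y ∈ (G b1).map (fun c => (b1, c)), pvLex (b0, ch) y = false := by
          intro y hy
          obtain ⟨c, _, rfl⟩ := List.mem_map.mp hy
          show (decide (b0 < b1) || (!decide (b1 < b0) && decide (pvAxisB ch < pvAxisB c))) = false
          rw [decide_eq_false (not_lt_of_gt hgt), decide_eq_true hgt]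
          rfl
        have hins : PySem.List.insertBy pvStrC b0 (b1 :: rest) = b1 :: PySem.List.insertBy pvStrC b0 rest := by
          simp [PySem.List.insertBy, pvStrC, not_lt_of_gt hgt]
        rw [pvFlat_cons, insertBy_skip _ _ _ _ hskip,
          ih hpwr (fun b hb => hne b (by simp [hb])) (fun h => hnm (by simp [h])),
          hins, pvFlat_cons, if_neg (fun h : b1 = b0 => hne1 h.symm)]

theorem sorted2_snoc (xs : List (String × String)) (x : String × String) :
    PySem.List.sorted2 (xs ++ [x]) (fun p => p.1) (fun p => pvAxisB p.2)
      = PySem.List.insertBy pvLex x (PySem.List.sorted2 xs (fun p => p.1) (fun p => pvAxisB p.2)) := by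
  rw [show ∀ m : List (String × String), PySem.List.sorted2 m (fun p => p.1) (fun p => pvAxisB p.2)
      = List.foldl (fun acc y => PySem.List.insertBy pvLex y acc) [] m from fun m => rfl,
    List.foldl_append]
  rfl

theorem sorted_snoc {α κ : Type} [LT κ] [DecidableLT κ] (xs : List α) (x : α) (key : α → κ) :
    PySem.List.sorted (xs ++ [x]) key
      = PySem.List.insertBy (fun a b => decide (key a < key b)) x (PySem.List.sorted xs key) := by
  rw [PySem.List.sorted_eq_foldl_insertBy, PySem.List.sorted_eq_foldl_insertBy, List.foldl_append]
  rfl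

theorem dedup_snoc (xs : List String) (x : String) :
    PySem.List.dedup (xs ++ [x])
      = if x ∈ PySem.List.dedup xs then PySem.List.dedup xs else PySem.List.dedup xs ++ [x] := by
  simp only [PySem.List.dedup_eq_ofList, PySem.Set.ofList_eq_foldl, List.foldl_append,
    List.foldl_cons, List.foldl_nil]
  rw [PySem.Set.add]
  by_cases h : x ∈ List.foldl PySem.Set.add [] xs
  · simp [PySem.Set.contains_eq_listContains, h]
  · simp [PySem.Set.contains_eq_listContains, h]

theorem pvF_snoc (l : List String) (ch b : String) :
    pvF (l ++ [ch]) b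
      = if pvBaseB ch = b then PySem.List.insertBy pvAxC ch (pvF l b) else pvF l b := by
  simp only [pvF, List.filter_append]
  by_cases h : pvBaseB ch = b
  · simp only [List.filter_cons, List.filter_nil, h, beq_self_eq_true, if_true]
    rw [sorted_snoc]
    rfl
  · have hb : (pvBaseB ch == b) = false := by simp [h]
    simp [hb, h]

theorem pvF_of_not_mem (l : List String) (b : String)
    (h : b ∉ PySem.List.dedup (l.map pvBaseB)) : pvF l b = [] := by
  have hfil : l.filter (fun ch => pvBaseB ch == b) = [] := by
    apply List.filter_eq_nil_iff.mpr
    intro ch hch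
    have hne : pvBaseB ch ≠ b := by
      intro he
      exact h ((PySem.List.mem_dedup _ _).mpr (List.mem_map.mpr ⟨ch, hch, he⟩))
    simpa using hne
  rw [pvF, hfil]
  rfl

theorem pvF_ne_nil (l : List String) (b : String)
    (h : b ∈ PySem.List.dedup (l.map pvBaseB)) : pvF l b ≠ [] := by
  intro hnil
  rw [pvF, PySem.List.sorted_eq_nil_iff] at hnil
  rw [PySem.List.mem_dedup] at h
  obtain ⟨ch, hch, he⟩ := List.mem_map.mp h
  have : ch ∈ l.filter (fun ch => pvBaseB ch == b) := List.mem_filter.mpr ⟨hch, by simp [he]⟩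
  simp [hnil] at this

theorem sortB_pairwise (l : List String) :
    (PySem.List.sorted (PySem.List.dedup (l.map pvBaseB)) (fun b => b)).Pairwise (· < ·) := by
  rw [PySem.List.dedup_eq_ofList]
  exact PySem.List.sorted_ofList_pairwise_lt (l.map pvBaseB)

-- the stable (base, axis) sort of the pairs is the base-sorted concatenation of the axis-sorted groups
theorem sorted2_pairs_eq (l : List String) :
    PySem.List.sorted2 (l.map (fun ch => (pvBaseB ch, ch))) (fun p => p.1) (fun p => pvAxisB p.2)
      = pvFlat (pvF l) (PySem.List.sorted (PySem.List.dedup (l.map pvBaseB)) (fun b => b)) := by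
  induction l using List.reverseRecOn with
  | nil => rfl
  | append_singleton l ch ih =>
      rw [List.map_append, List.map_singleton, sorted2_snoc, ih]
      have hmap : (l ++ [ch]).map pvBaseB = l.map pvBaseB ++ [pvBaseB ch] := by
        rw [List.map_append, List.map_singleton]
      by_cases hmem : pvBaseB ch ∈ PySem.List.dedup (l.map pvBaseB)
      · rw [insert_flat_mem (pvF l) (pvBaseB ch) ch _ (sortB_pairwise l)
          ((PySem.List.mem_sorted _ _ _ _).mpr hmem)]
        rw [hmap, dedup_snoc]
        simp only [hmem, if_true]
        apply pvFlat_congr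
        intro b _
        rw [pvF_snoc]
        by_cases he : pvBaseB ch = b
        · subst he
          simp
        · have hne : ¬ b = pvBaseB ch := fun hh => he hh.symm
          simp [he, hne]
      · rw [insert_flat_new (pvF l) (pvBaseB ch) ch _ (sortB_pairwise l)
          (fun b hb => pvF_ne_nil l b ((PySem.List.mem_sorted _ _ _ _).mp hb))
          (fun h => hmem ((PySem.List.mem_sorted _ _ _ _).mp h))]
        rw [hmap, dedup_snoc]
        simp only [hmem, if_false]
        rw [sorted_snoc]
        rw [show (fun a b => decide ((fun b => b) a < (fun b => b) b)) = pvStrC from rfl]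
        apply pvFlat_congr
        intro b hb
        rw [pvF_snoc]
        by_cases he : b = pvBaseB ch
        · subst he
          rw [pvF_of_not_mem l _ hmem]
          simp [PySem.List.insertBy]
        · have hne : ¬ pvBaseB ch = b := fun hh => he hh.symm
          simp [he, hne]

-- the grouping loop over one base's block extends the open group
theorem foldl_step_block (b : String) :
    ∀ (chs : List String) (out : List (String × List String)) (acc : List String),
    List.foldl pvStep (out ++ [(b, acc)]) (chs.map (fun c => (b, c))) = out ++ [(b, acc ++ chs)] := by
  intro chs
  induction chs with
  | nil => intro out acc; simp
  | cons c chs ih =>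
      intro out acc
      have hstep : pvStep (out ++ [(b, acc)]) (b, c) = out ++ [(b, acc ++ [c])] := by
        simp [pvStep]
      simp only [List.map_cons, List.foldl_cons, hstep, ih]
      simp

theorem pvStep_new (out : List (String × List String)) (b c : String)
    (h : out = [] ∨ (out.getLastD ("", [])).1 ≠ b) : pvStep out (b, c) = out ++ [(b, [c])] := by
  rcases h with h | h
  · subst h; simp [pvStep]
  · rw [List.getLastD_eq_getLast?] at h
    simp [pvStep, h]

-- the grouping loop rebuilds exactly one group per base, in block order
theorem foldl_step_flat (G : String → List String) :
    ∀ (bs : List String), bs.Pairwise (· < ·) → (∀ b ∈ bs, G b ≠ []) →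
    ∀ (out : List (String × List String)),
      (∀ b ∈ bs, out = [] ∨ (out.getLastD ("", [])).1 ≠ b) →
    List.foldl pvStep out (pvFlat G bs) = out ++ bs.map (fun b => (b, G b)) := by
  intro bs
  induction bs with
  | nil => intro _ _ out _; simp [pvFlat]
  | cons b rest ih =>
      intro hpw hne out hlast
      have hpw1 : ∀ b' ∈ rest, b < b' := fun b' hb => (List.pairwise_cons.mp hpw).1 b' hb
      obtain ⟨c, cs, hc⟩ := List.exists_cons_of_ne_nil (hne b (by simp))
      rw [pvFlat_cons, List.foldl_append, hc, List.map_cons, List.foldl_cons,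
        pvStep_new out b c (hlast b (by simp)), foldl_step_block b cs out [c],
        ih (List.pairwise_cons.mp hpw).2 (fun b' hb => hne b' (by simp [hb]))
          (out ++ [(b, [c] ++ cs)])
          (by
            intro b' hb
            right
            simp only [List.getLastD_concat]
            exact fun hh => absurd (hh ▸ hpw1 b' hb) (lt_irrefl b))]
      simp [← hc]

-- first element of a group determines its base
theorem base_head_group (l : List String) (b : String)
    (hb : b ∈ PySem.List.dedup (l.map pvBaseB)) :
    pvBaseB (PySem.List.pyGetD (pvF l b) 0 "") = b := by
  obtain ⟨c, cs, hc⟩ := List.exists_cons_of_ne_nil (pvF_ne_nil l b hb)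
  rw [hc, PySem.List.pyGetD_zero_cons]
  have hm : c ∈ pvF l b := by rw [hc]; simp
  rw [pvF, PySem.List.mem_sorted] at hm
  have := List.of_mem_filter hm
  simpa using this

-- sorting the base-sorted key list by first channel equals sorting the raw key list
theorem sorted_sortB_eq (l : List String) :
    PySem.List.sorted (PySem.List.sorted (PySem.List.dedup (l.map pvBaseB)) (fun b => b))
        (fun b => PySem.List.pyGetD (pvF l b) 0 "")
      = PySem.List.sorted (PySem.List.dedup (l.map pvBaseB))
        (fun b => PySem.List.pyGetD (pvF l b) 0 "") := by
  apply PySem.List.sorted_eq_of_perm_of_pairwise_lt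
  · exact (PySem.List.sorted_perm _ _ _).trans (PySem.List.sorted_perm _ _ _).symm
  · have h1 := PySem.List.sorted_pairwise (PySem.List.dedup (l.map pvBaseB))
      (fun b => PySem.List.pyGetD (pvF l b) 0 "")
    have h2 : (PySem.List.sorted (PySem.List.dedup (l.map pvBaseB))
        (fun b => PySem.List.pyGetD (pvF l b) 0 "")).Nodup :=
      (PySem.List.sorted_perm _ _ _).symm.nodup (PySem.List.nodup_dedup _)
    refine (h1.and h2).imp_of_mem ?_
    intro a b ha hb hab
    have hamem : a ∈ PySem.List.dedup (l.map pvBaseB) := (PySem.List.mem_sorted _ _ _ _).mp ha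
    have hbmem : b ∈ PySem.List.dedup (l.map pvBaseB) := (PySem.List.mem_sorted _ _ _ _).mp hb
    refine lt_of_le_of_ne hab.1 ?_
    intro he
    exact hab.2 ((base_head_group l a hamem).symm.trans (he ▸ base_head_group l b hbmem))

-- ===== VERDICT (by name: the statement is the Claim_ definition above) =====
theorem group_imu_channels_py_spec : Claim_equal_group_imu_channels_py := by
  intro l _
  show group_imu_channels_py l = group_imu_channels_py_alt l
  simp only [group_imu_channels_py, group_imu_channels_py_alt]
  simp only [groups2_getD, groups2_keys]
  simp only [pvBase_eq, funext pvAxis_eq]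
  rw [sorted2_pairs_eq l]
  rw [foldl_step_flat (pvF l) _ (sortB_pairwise l)
    (fun b hb => pvF_ne_nil l b ((PySem.List.mem_sorted _ _ _ _).mp hb))
    [] (fun b _ => Or.inl rfl)]
  rw [List.nil_append, sorted_map_key (fun b => (b, pvF l b)) (fun g => PySem.List.pyGetD g.2 0 "")]
  rw [sorted_sortB_eq l]
  simp [pvF]
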